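-- pv_equiv track=rewrite | github.com/yangqi-su/perturb-data-lab | src/perturb_data_lab/inspectors/workflow.py | _infer_literal_perturbation_type
-- ===== SOURCE A (Python) =====
-- def _normalize_label(value: str) -> str:
--     return "".join(character for character in value.lower() if character.isalnum())
--
-- def _infer_literal_perturbation_type(columns: tuple[str, ...]) -> str | None:
--     normalized_columns = {_normalize_label(column) for column in columns}
--     if any(
--         token in value
--         for value in normalized_columns
--         for token in ("guide", "sgrna", "grna", "crispr", "sgid")
--     ):
--         return "CRISPR"
--     if any(
--         token in value for value in normalized_columns for token in ("drug", "compound")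
--     ):
--         return "compound"
--     if any(
--         token in value for value in normalized_columns for token in ("cytokine", "stim")
--     ):
--         return "stimulation"
--     return None
-- ===== SOURCE B (Python) =====
-- _RANKED_TOKENS = (
--     ("guide", 0), ("sgrna", 0), ("grna", 0), ("crispr", 0), ("sgid", 0),
--     ("drug", 1), ("compound", 1),
--     ("cytokine", 2), ("stim", 2),
-- )
--
-- _CATEGORIES = ("CRISPR", "compound", "stimulation")
--
--
-- def _normalize_label(value: str) -> str:
--     return "".join(character for character in value.lower() if character.isalnum())
--
--
-- def _column_rank(normalized: str) -> int:
--     return min((rank for token, rank in _RANKED_TOKENS if token in normalized), default=3)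
--
--
-- def _infer_literal_perturbation_type(columns: tuple[str, ...]) -> str | None:
--     best = 3
--     for column in columns:
--         best = min(best, _column_rank(_normalize_label(column)))
--         if best == 0:
--             break
--     return _CATEGORIES[best] if best < 3 else None
-- ===== Notes on version B (the rewrite author's own statement) =====
-- stated objective: alternative
-- what changed: Replaces A's three separate short-circuiting per-category scans over the normalized-column set with a per-column numeric rank (minimum over a ranked token table) aggregated across columns by a single min-fold with early exit at rank 0, then one index into the category tuple.
import Mathlib
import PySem

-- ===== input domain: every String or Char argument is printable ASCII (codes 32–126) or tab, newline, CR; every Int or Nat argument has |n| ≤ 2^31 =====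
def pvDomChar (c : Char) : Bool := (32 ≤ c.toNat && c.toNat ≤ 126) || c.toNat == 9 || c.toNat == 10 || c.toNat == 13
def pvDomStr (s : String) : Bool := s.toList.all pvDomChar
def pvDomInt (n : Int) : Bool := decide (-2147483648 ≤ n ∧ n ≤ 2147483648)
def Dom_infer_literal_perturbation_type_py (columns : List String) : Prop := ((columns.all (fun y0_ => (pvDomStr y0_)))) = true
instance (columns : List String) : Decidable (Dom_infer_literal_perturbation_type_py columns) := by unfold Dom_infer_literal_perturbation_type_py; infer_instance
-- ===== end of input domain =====

-- B replaces A's three staged short-circuiting category scans over the column set with a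
-- per-column numeric rank (min over a ranked token table) aggregated by one min-fold with
-- early exit, then a single index into the category tuple (alternative, same cost).

-- ===== PORT A =====
-- _normalize_label: lowercase, keep only alphanumeric characters
def normalize_label_py (value : String) : String :=
  String.ofList ((PySem.Str.lower value).toList.filter (fun c => PySem.Chars.isalnum c))

def infer_literal_perturbation_type_py (columns : List String) : Option String :=
  let normalized_columns : PySem.Set String := PySem.Set.ofList (columns.map normalize_label_py)
  if normalized_columns.any (fun value =>
      (["guide", "sgrna", "grna", "crispr", "sgid"] : List String).any
        (fun token => PySem.Str.isIn token value)) then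
    some "CRISPR"
  else if normalized_columns.any (fun value =>
      (["drug", "compound"] : List String).any (fun token => PySem.Str.isIn token value)) then
    some "compound"
  else if normalized_columns.any (fun value =>
      (["cytokine", "stim"] : List String).any (fun token => PySem.Str.isIn token value)) then
    some "stimulation"
  else none

-- ===== PORT B =====
def pvRankedTokens : List (String × Nat) :=
  [("guide", 0), ("sgrna", 0), ("grna", 0), ("crispr", 0), ("sgid", 0),
   ("drug", 1), ("compound", 1), ("cytokine", 2), ("stim", 2)]

def pvCategories : List String := ["CRISPR", "compound", "stimulation"]

-- min(generator, default=3): a fold of Nat.min starting from the default is exact here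
-- since every rank in the fixed table is ≤ 3.
def column_rank_py (normalized : String) : Nat :=
  (((pvRankedTokens.filter (fun p => PySem.Str.isIn p.1 normalized)).map Prod.snd).foldl
    Nat.min 3)

-- the 'for column in columns' loop with its 'if best == 0: break'
def pvBestLoop : Nat → List String → Nat
  | best, [] => best
  | best, column :: rest =>
      let b := Nat.min best (column_rank_py (normalize_label_py column))
      if b = 0 then b else pvBestLoop b rest

def infer_literal_perturbation_type_py_alt (columns : List String) : Option String :=
  let best := pvBestLoop 3 columns
  if best < 3 then some (pvCategories.getD best "") else none

-- ===== PRECONDITION & SPEC =====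
def Spec_infer_literal_perturbation_type_py (columns : List String) (out : Option String) : Prop := out = infer_literal_perturbation_type_py_alt columns
instance (columns : List String) (out : Option String) : Decidable (Spec_infer_literal_perturbation_type_py columns out) := by unfold Spec_infer_literal_perturbation_type_py; infer_instance

-- ===== CLAIM (what is proved, stated in full; the proofs are below) =====
def Claim_equal_infer_literal_perturbation_type_py : Prop := ∀ (columns : List String), Dom_infer_literal_perturbation_type_py columns → Spec_infer_literal_perturbation_type_py columns (infer_literal_perturbation_type_py columns)

-- ===== LEMMAS AND PROOFS =====

-- per-column token predicates, one per category
def pvP0 (c : String) : Bool :=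
  (["guide", "sgrna", "grna", "crispr", "sgid"] : List String).any
    (fun token => PySem.Str.isIn token (normalize_label_py c))
def pvP1 (c : String) : Bool :=
  (["drug", "compound"] : List String).any
    (fun token => PySem.Str.isIn token (normalize_label_py c))
def pvP2 (c : String) : Bool :=
  (["cytokine", "stim"] : List String).any
    (fun token => PySem.Str.isIn token (normalize_label_py c))

theorem fold_min_le_init (L : List Nat) : ∀ d : Nat, L.foldl Nat.min d ≤ d := by
  induction L with
  | nil => intro d; simp
  | cons a t ih => intro d; exact le_trans (ih _) (Nat.min_le_left _ _)

theorem fold_min_le_of_mem (L : List Nat) (x : Nat) (hx : x ∈ L) :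
    ∀ d : Nat, L.foldl Nat.min d ≤ x := by
  induction L with
  | nil => cases hx
  | cons a t ih =>
      intro d
      rcases List.mem_cons.mp hx with rfl | hx'
      · exact le_trans (fold_min_le_init t _) (Nat.min_le_right _ _)
      · exact ih hx' _

theorem fold_min_eq_or_mem (L : List Nat) :
    ∀ d : Nat, L.foldl Nat.min d = d ∨ L.foldl Nat.min d ∈ L := by
  induction L with
  | nil => intro d; left; rfl
  | cons a t ih =>
      intro d
      rcases ih (Nat.min d a) with h | h
      · rw [List.foldl_cons, h]
        rcases Nat.le_total d a with h' | h'
        · left; unfold Nat.min; omega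
        · right
          have ha : d.min a = a := by unfold Nat.min; omega
          rw [ha]; exact List.mem_cons_self
      · right; exact List.mem_cons_of_mem _ h

theorem fold_min_lb (L : List Nat) (k : Nat) (h : ∀ x ∈ L, k ≤ x) :
    ∀ d : Nat, k ≤ d → k ≤ L.foldl Nat.min d := by
  induction L with
  | nil => intro d hd; exact hd
  | cons a t ih =>
      intro d hd
      have ha : k ≤ a := h a List.mem_cons_self
      exact ih (fun x hx => h x (List.mem_cons_of_mem _ hx)) _ (by unfold Nat.min; omega)

theorem fold_min_char (L : List Nat) (hall : ∀ x ∈ L, x = 0 ∨ x = 1 ∨ x = 2) :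
    L.foldl Nat.min 3 = if 0 ∈ L then 0 else if 1 ∈ L then 1 else if 2 ∈ L then 2 else 3 := by
  have hor := fold_min_eq_or_mem L 3
  split_ifs with g0 g1 g2
  · exact Nat.le_zero.mp (fold_min_le_of_mem L 0 g0 3)
  · have hle := fold_min_le_of_mem L 1 g1 3
    rcases hor with h | h
    · omega
    · rcases hall _ h with h' | h' | h' <;>
        first | (exfalso; rw [h'] at h; exact g0 h) | exact h' | omega
  · have hle := fold_min_le_of_mem L 2 g2 3
    rcases hor with h | h
    · omega
    · rcases hall _ h with h' | h' | h' <;> first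
        | (exfalso; rw [h'] at h; exact g0 h)
        | (exfalso; rw [h'] at h; exact g1 h)
        | exact h'
  · rcases hor with h | h
    · exact h
    · rcases hall _ h with h' | h' | h' <;> rw [h'] at h <;>
        [exact absurd h g0; exact absurd h g1; exact absurd h g2]

theorem pv_rank_eq (c : String) :
    column_rank_py (normalize_label_py c) =
      if pvP0 c then 0 else if pvP1 c then 1 else if pvP2 c then 2 else 3 := by
  unfold column_rank_py
  rw [fold_min_char _ (by intro x hx; simp [pvRankedTokens] at hx; omega)]
  have h0 : (0 ∈ ((pvRankedTokens.filter
      (fun p => PySem.Str.isIn p.1 (normalize_label_py c))).map Prod.snd)) ↔ pvP0 c = true := by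
    simp [pvRankedTokens, pvP0]
  have h1 : (1 ∈ ((pvRankedTokens.filter
      (fun p => PySem.Str.isIn p.1 (normalize_label_py c))).map Prod.snd)) ↔ pvP1 c = true := by
    simp [pvRankedTokens, pvP1]
  have h2 : (2 ∈ ((pvRankedTokens.filter
      (fun p => PySem.Str.isIn p.1 (normalize_label_py c))).map Prod.snd)) ↔ pvP2 c = true := by
    simp [pvRankedTokens, pvP2]
  simp only [h0, h1, h2]

theorem pv_foldl_min_zero (cols : List String) :
    cols.foldl (fun b c => Nat.min b (column_rank_py (normalize_label_py c))) 0 = 0 := by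
  induction cols with
  | nil => rfl
  | cons c t ih => simpa [Nat.zero_min] using ih

theorem pv_loop_eq_foldl (cols : List String) : ∀ best : Nat,
    pvBestLoop best cols =
      cols.foldl (fun b c => Nat.min b (column_rank_py (normalize_label_py c))) best := by
  induction cols with
  | nil => intro best; rfl
  | cons c t ih =>
      intro best
      simp only [pvBestLoop, List.foldl_cons]
      split_ifs with h
      · rw [h, pv_foldl_min_zero]
      · exact ih _

theorem pv_bool_ext (a b : Bool) (h : (a = true) ↔ (b = true)) : a = b := by
  cases a <;> cases b <;> simp_all

theorem pv_set_any (f : String → Bool) (columns : List String) :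
    (PySem.Set.ofList (columns.map normalize_label_py)).any f =
      columns.any (fun c => f (normalize_label_py c)) := by
  apply pv_bool_ext
  simp only [List.any_eq_true]
  constructor
  · rintro ⟨v, hv, hf⟩
    rw [PySem.Set.mem_ofList, List.mem_map] at hv
    obtain ⟨c, hc, rfl⟩ := hv
    exact ⟨c, hc, hf⟩
  · rintro ⟨c, hc, hf⟩
    exact ⟨normalize_label_py c, by
      rw [PySem.Set.mem_ofList, List.mem_map]; exact ⟨c, hc, rfl⟩, hf⟩

-- ===== VERDICT (by name: the statement is the Claim_ definition above) =====
theorem infer_literal_perturbation_type_py_spec : Claim_equal_infer_literal_perturbation_type_py := by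
  intro columns _
  unfold Spec_infer_literal_perturbation_type_py
  unfold infer_literal_perturbation_type_py infer_literal_perturbation_type_py_alt
  simp only [pv_set_any, pv_loop_eq_foldl]
  have e0 : (columns.any (fun c =>
      (["guide", "sgrna", "grna", "crispr", "sgid"] : List String).any
        (fun token => PySem.Str.isIn token (normalize_label_py c)))) = columns.any pvP0 := rfl
  have e1 : (columns.any (fun c =>
      (["drug", "compound"] : List String).any
        (fun token => PySem.Str.isIn token (normalize_label_py c)))) = columns.any pvP1 := rfl
  have e2 : (columns.any (fun c =>
      (["cytokine", "stim"] : List String).any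
        (fun token => PySem.Str.isIn token (normalize_label_py c)))) = columns.any pvP2 := rfl
  rw [e0, e1, e2]
  have hfm : columns.foldl (fun b c => Nat.min b (column_rank_py (normalize_label_py c))) 3 =
      (columns.map (fun c => column_rank_py (normalize_label_py c))).foldl Nat.min 3 :=
    List.foldl_map.symm
  rw [hfm]
  -- write m for B's aggregated best rank
  set L := columns.map (fun c => column_rank_py (normalize_label_py c)) with hLdef
  cases ha0 : columns.any pvP0 with
  | true =>
      obtain ⟨c, hc, hp⟩ := List.any_eq_true.mp ha0
      have hr : column_rank_py (normalize_label_py c) = 0 := by rw [pv_rank_eq, hp]; rfl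
      have hmem : (0 : Nat) ∈ L := by
        rw [hLdef]; exact hr ▸ List.mem_map_of_mem hc
      have hm : L.foldl Nat.min 3 = 0 := Nat.le_zero.mp (fold_min_le_of_mem L 0 hmem 3)
      simp [hm, pvCategories]
  | false =>
      have h0all : ∀ c ∈ columns, pvP0 c = false := by
        intro c hc
        have := List.any_eq_false.mp ha0 c hc
        simpa using this
      have hlb1 : ∀ x ∈ L, 1 ≤ x := by
        intro x hx
        rw [hLdef] at hx
        obtain ⟨c, hc, rfl⟩ := List.mem_map.mp hx
        rw [pv_rank_eq, h0all c hc]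
        simp only [Bool.false_eq_true, if_false]
        split_ifs <;> omega
      cases ha1 : columns.any pvP1 with
      | true =>
          obtain ⟨c, hc, hp⟩ := List.any_eq_true.mp ha1
          have hr : column_rank_py (normalize_label_py c) = 1 := by
            rw [pv_rank_eq, h0all c hc, hp]; rfl
          have hmem : (1 : Nat) ∈ L := by
            rw [hLdef]; exact hr ▸ List.mem_map_of_mem hc
          have hub := fold_min_le_of_mem L 1 hmem 3
          have hlb := fold_min_lb L 1 hlb1 3 (by omega)
          have hm : L.foldl Nat.min 3 = 1 := by omega
          simp [hm, pvCategories]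
      | false =>
          have h1all : ∀ c ∈ columns, pvP1 c = false := by
            intro c hc
            have := List.any_eq_false.mp ha1 c hc
            simpa using this
          cases ha2 : columns.any pvP2 with
          | true =>
              obtain ⟨c, hc, hp⟩ := List.any_eq_true.mp ha2
              have hr : column_rank_py (normalize_label_py c) = 2 := by
                rw [pv_rank_eq, h0all c hc, h1all c hc, hp]; rfl
              have hmem : (2 : Nat) ∈ L := by
                rw [hLdef]; exact hr ▸ List.mem_map_of_mem hc
              have hlb2 : ∀ x ∈ L, 2 ≤ x := by
                intro x hx
                rw [hLdef] at hx
                obtain ⟨c', hc', rfl⟩ := List.mem_map.mp hx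
                rw [pv_rank_eq, h0all c' hc', h1all c' hc']
                simp only [Bool.false_eq_true, if_false]
                split_ifs <;> omega
              have hub := fold_min_le_of_mem L 2 hmem 3
              have hlb := fold_min_lb L 2 hlb2 3 (by omega)
              have hm : L.foldl Nat.min 3 = 2 := by omega
              simp [hm, pvCategories]
          | false =>
              have h2all : ∀ c ∈ columns, pvP2 c = false := by
                intro c hc
                have := List.any_eq_false.mp ha2 c hc
                simpa using this
              have hlb3 : ∀ x ∈ L, 3 ≤ x := by
                intro x hx
                rw [hLdef] at hx
                obtain ⟨c', hc', rfl⟩ := List.mem_map.mp hx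
                rw [pv_rank_eq, h0all c' hc', h1all c' hc', h2all c' hc']
                simp
              have hub := fold_min_le_init L 3
              have hlb := fold_min_lb L 3 hlb3 3 (by omega)
              have hm : L.foldl Nat.min 3 = 3 := by omega
              simp [hm]
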